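-- pv_equiv track=rewrite | github.com/Hsin-Ping/CDS_datamining_annotation | main.py | parsing_info
-- ===== SOURCE A (Python) =====
-- def parsing_info(cds_infos):
--     structured_info = dict(GeneID=[], protein=[], ProteinID=[], others_info=[])
--     try:
--         for infos in cds_infos:
--             [structured_info[key].append(None) for key in structured_info.keys()]
--             others_info = []
--             for info in infos:
--                 others_info_condition = [info.find("cds") == -1, info.find("location") == -1,
--                                           info.find("gbkey=CDS") == -1, info.find("gene=") == -1,
--                                           info.find("db_xref") == -1, info.find("protein") == -1]
--
--                 if info.find("GeneID") != -1:
--                     structured_info["GeneID"][-1] = info.split("GeneID:")[-1]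
--
--                 if info.find("protein=") != -1:
--                     structured_info["protein"][-1] = info.split("protein=")[-1]
--
--                 if info.find("protein_id") != -1:
--                     structured_info["ProteinID"][-1] = info.split("protein_id=")[-1]
--
--                 if all(others_info_condition) :
--                     others_info.append(info)
--
--                 structured_info["others_info"][-1] = " / ".join(others_info)
--     except Exception as e:
--         raise str(e)
--     return structured_info
-- ===== SOURCE B (Python) =====
-- def _last_field(infos, marker, sep):
--     for info in reversed(infos):
--         if marker in info:
--             return info.split(sep)[-1]
--     return None
--
-- _MARKERS = ("cds", "location", "gbkey=CDS", "gene=", "db_xref", "protein")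
--
-- def parsing_info(cds_infos):
--     return {
--         "GeneID": [_last_field(r, "GeneID", "GeneID:") for r in cds_infos],
--         "protein": [_last_field(r, "protein=", "protein=") for r in cds_infos],
--         "ProteinID": [_last_field(r, "protein_id", "protein_id=") for r in cds_infos],
--         "others_info": [" / ".join(i for i in r if not any(m in i for m in _MARKERS))
--                         if r else None for r in cds_infos],
--     }
-- ===== Notes on version B (the rewrite author's own statement) =====
-- stated objective: alternative
-- what changed: Replaces A's single mutating pass (append None placeholders to every dict column, then rewrite each column's [-1] cell and re-join others on every inner iteration) with field-wise extraction: each output column is computed by its own comprehension, the three keyed fields by an early-exiting scan of the reversed record (first match from the end = A's last-match-wins), others by a filter-and-join. (A re-joins the others string on every inner line, quadratic per record; B joins once per record)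
import Mathlib
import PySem

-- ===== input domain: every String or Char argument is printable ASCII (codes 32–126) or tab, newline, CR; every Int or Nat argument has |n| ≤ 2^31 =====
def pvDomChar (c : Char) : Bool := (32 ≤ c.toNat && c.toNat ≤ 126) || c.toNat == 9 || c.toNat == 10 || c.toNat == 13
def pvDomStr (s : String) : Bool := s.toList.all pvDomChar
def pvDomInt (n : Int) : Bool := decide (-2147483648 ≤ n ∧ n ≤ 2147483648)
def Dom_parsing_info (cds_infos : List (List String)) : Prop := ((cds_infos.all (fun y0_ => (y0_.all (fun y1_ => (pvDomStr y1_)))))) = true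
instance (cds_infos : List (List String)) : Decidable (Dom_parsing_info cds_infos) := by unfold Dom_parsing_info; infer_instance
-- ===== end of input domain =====

-- B replaces A's single mutating pass (append None placeholders to every dict column,
-- rewrite each column's [-1] cell, re-join others on every inner line) with field-wise
-- extraction: each output column is its own comprehension; the keyed fields are found by
-- an early-exiting scan of the reversed record, others by a filter-and-join (objective: alternative).

-- ===== PORT A =====
-- info.split(sep)[-1] for a nonempty literal sep: split? is `some` (sep ≠ ""), and Python's
-- split never returns an empty list, so the getD/getLastD defaults are never used.
def pvLastSplit (info sep : String) : String :=
  ((PySem.Str.split? info sep).getD []).getLastD ""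

-- one iteration of A's inner `for info in infos` loop; state = (structured_info, others_info).
-- `structured_info[key][-1] = v` on the always-nonempty freshly appended column is l.dropLast ++ [v].
def pvAInner (st : PySem.Dict String (List (Option String)) × List String) (info : String) :
    PySem.Dict String (List (Option String)) × List String :=
  let d := st.1
  let others_info := st.2
  let cond : List Bool := [PySem.Str.find info "cds" == -1, PySem.Str.find info "location" == -1,
      PySem.Str.find info "gbkey=CDS" == -1, PySem.Str.find info "gene=" == -1,
      PySem.Str.find info "db_xref" == -1, PySem.Str.find info "protein" == -1]
  let d := if PySem.Str.find info "GeneID" ≠ -1 then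
      d.modify "GeneID" [] (fun l => l.dropLast ++ [some (pvLastSplit info "GeneID:")]) else d
  let d := if PySem.Str.find info "protein=" ≠ -1 then
      d.modify "protein" [] (fun l => l.dropLast ++ [some (pvLastSplit info "protein=")]) else d
  let d := if PySem.Str.find info "protein_id" ≠ -1 then
      d.modify "ProteinID" [] (fun l => l.dropLast ++ [some (pvLastSplit info "protein_id=")]) else d
  let others_info := if cond.all id then others_info ++ [info] else others_info
  let d := d.modify "others_info" [] (fun l => l.dropLast ++ [some (PySem.Str.join " / " others_info)])
  (d, others_info)

-- one iteration of A's outer loop: append None under every key, then run the inner loop.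
def pvAOuter (d : PySem.Dict String (List (Option String))) (infos : List String) :
    PySem.Dict String (List (Option String)) :=
  let d := d.keys.foldl (fun d k => d.modify k [] (fun l => l ++ [(none : Option String)])) d
  (infos.foldl pvAInner (d, [])).1

-- The try/except re-raises `str(e)` but no statement in the loop can raise on a
-- well-typed list[list[str]] input, so A is total here.
def parsing_info (cds_infos : List (List String)) : List (String × List (Option String)) :=
  let structured_info : PySem.Dict String (List (Option String)) :=
    PySem.Dict.mk [("GeneID", []), ("protein", []), ("ProteinID", []), ("others_info", [])]
  (cds_infos.foldl pvAOuter structured_info).items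

-- ===== PORT B =====
-- B's _last_field: walk the reversed record, return the split of the first matching line.
def pvLastFieldGo (marker sep : String) : List String → Option String
  | [] => none
  | info :: rest =>
      if PySem.Str.isIn marker info then some (pvLastSplit info sep)
      else pvLastFieldGo marker sep rest

def pvLastField (infos : List String) (marker sep : String) : Option String :=
  pvLastFieldGo marker sep infos.reverse

-- B's `not any(m in i for m in _MARKERS)` filter predicate.
def pvOthersPred (info : String) : Bool :=
  !(["cds", "location", "gbkey=CDS", "gene=", "db_xref", "protein"].any
      (fun k => PySem.Str.isIn k info))

def parsing_info_alt (cds_infos : List (List String)) : List (String × List (Option String)) :=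
  [("GeneID", cds_infos.map (fun r => pvLastField r "GeneID" "GeneID:")),
   ("protein", cds_infos.map (fun r => pvLastField r "protein=" "protein=")),
   ("ProteinID", cds_infos.map (fun r => pvLastField r "protein_id" "protein_id=")),
   ("others_info", cds_infos.map (fun r =>
      if r.isEmpty then none
      else some (PySem.Str.join " / " (r.filter pvOthersPred))))]

-- ===== PRECONDITION & SPEC =====
def Spec_parsing_info (cds_infos : List (List String)) (out : List (String × List (Option String))) : Prop := out = parsing_info_alt cds_infos
instance (cds_infos : List (List String)) (out : List (String × List (Option String))) : Decidable (Spec_parsing_info cds_infos out) := by unfold Spec_parsing_info; infer_instance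

-- ===== CLAIM (what is proved, stated in full; the proofs are below) =====
def Claim_equal_parsing_info : Prop := ∀ (cds_infos : List (List String)), Dom_parsing_info cds_infos → Spec_parsing_info cds_infos (parsing_info cds_infos)

-- ===== LEMMAS AND PROOFS =====

-- proof-only helpers: a row-wise reading of A's loop, used to bridge A's fold to B's columns
def pvRow (st : Option String × Option String × Option String × List String) (info : String) :
    Option String × Option String × Option String × List String :=
  let (g, p, q, others) := st
  let g := if PySem.Str.isIn "GeneID" info then some (pvLastSplit info "GeneID:") else g
  let p := if PySem.Str.isIn "protein=" info then some (pvLastSplit info "protein=") else p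
  let q := if PySem.Str.isIn "protein_id" info then some (pvLastSplit info "protein_id=") else q
  let others := if pvOthersPred info then others ++ [info] else others
  (g, p, q, others)

def pvRowOuter (acc : List (Option String) × List (Option String) × List (Option String) × List (Option String))
    (infos : List String) :
    List (Option String) × List (Option String) × List (Option String) × List (Option String) :=
  let (gs, ps, qs, os) := acc
  let r := infos.foldl pvRow (none, none, none, [])
  (gs ++ [r.1], ps ++ [r.2.1], qs ++ [r.2.2.1],
   os ++ [if infos.isEmpty then none else some (PySem.Str.join " / " r.2.2.2)])

-- last-match-wins combinator
def pvOr (a b : Option String) : Option String :=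
  match a with
  | some v => some v
  | none => b

theorem pvOr_none (a : Option String) : pvOr a none = a := by cases a <;> rfl

theorem pvOr_if (a b : Option String) (c : Prop) [Decidable c] (v : String) :
    pvOr a (if c then some v else b) = pvOr (pvOr a (if c then some v else none)) b := by
  cases a <;> by_cases h : c <;> simp [pvOr, h]

-- `info.find(sub) == -1` is `not (sub in info)`
theorem pv_find_beq_neg_one (s sub : List Char) :
    (PySem.Chars.find s sub == -1) = !PySem.Chars.isIn sub s := by
  cases hb : PySem.Chars.isIn sub s
  · have h1 := (PySem.Chars.find_eq_neg_one_iff s sub).mpr ((PySem.Chars.isIn_eq_false_iff sub s).mp hb)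
    simp [h1]
  · have h1 := (PySem.Chars.find_ne_neg_one_iff s sub).mpr ((PySem.Chars.isIn_iff_infix sub s).mp hb)
    simp [beq_eq_false_iff_ne, h1]

-- `info.find(sub) != -1` (as a Prop) is `sub in info`
theorem pv_find_ne_iff (info sub : String) :
    (PySem.Str.find info sub ≠ -1) ↔ PySem.Str.isIn sub info = true := by
  simp only [PySem.Str.find_eq, PySem.Str.isIn_eq]
  rw [PySem.Chars.find_ne_neg_one_iff, PySem.Chars.isIn_iff_infix]

-- A's six-way condition list equals B's filter predicate
theorem pv_cond_eq (info : String) :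
    ([PySem.Str.find info "cds" == -1, PySem.Str.find info "location" == -1,
      PySem.Str.find info "gbkey=CDS" == -1, PySem.Str.find info "gene=" == -1,
      PySem.Str.find info "db_xref" == -1, PySem.Str.find info "protein" == -1].all id)
    = pvOthersPred info := by
  simp only [pvOthersPred, List.all_cons, List.all_nil, List.any_cons, List.any_nil, id,
    PySem.Str.find_eq, PySem.Str.isIn_eq, pv_find_beq_neg_one, Bool.not_or]
  simp

-- one A-inner step on the concrete four-key dict, in terms of the row step
theorem pv_inner_step (g p q o : List (Option String)) (gv pv qv ov : Option String)
    (os : List String) (info : String) :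
    pvAInner (PySem.Dict.mk [("GeneID", g ++ [gv]), ("protein", p ++ [pv]),
        ("ProteinID", q ++ [qv]), ("others_info", o ++ [ov])], os) info
    = (let r := pvRow (gv, pv, qv, os) info
       (PySem.Dict.mk [("GeneID", g ++ [r.1]), ("protein", p ++ [r.2.1]),
          ("ProteinID", q ++ [r.2.2.1]),
          ("others_info", o ++ [some (PySem.Str.join " / " r.2.2.2)])], r.2.2.2)) := by
  simp only [pvAInner, pvRow, pv_cond_eq, pv_find_ne_iff]
  split_ifs <;>
    simp_all [PySem.Dict.modify, PySem.Dict.insert, PySem.Dict.contains,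
      PySem.Dict.getD, PySem.Dict.get?]

-- A's inner loop tracked against the row fold
theorem pv_inner_eq (infos : List String) :
    ∀ (g p q o : List (Option String)) (gv pv qv ov : Option String) (os : List String),
    infos.foldl pvAInner (PySem.Dict.mk [("GeneID", g ++ [gv]), ("protein", p ++ [pv]),
        ("ProteinID", q ++ [qv]), ("others_info", o ++ [ov])], os)
    = (let r := infos.foldl pvRow (gv, pv, qv, os)
       (PySem.Dict.mk [("GeneID", g ++ [r.1]), ("protein", p ++ [r.2.1]),
          ("ProteinID", q ++ [r.2.2.1]),
          ("others_info", o ++ [if infos.isEmpty then ov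
              else some (PySem.Str.join " / " r.2.2.2)])], r.2.2.2)) := by
  induction infos with
  | nil => intro g p q o gv pv qv ov os; simp
  | cons info rest ih =>
    intro g p q o gv pv qv ov os
    simp only [List.foldl_cons, pv_inner_step]
    obtain ⟨g1, p1, q1, os1⟩ : Option String × Option String × Option String × List String :=
      pvRow (gv, pv, qv, os) info
    rw [ih g p q o g1 p1 q1 (some (PySem.Str.join " / " os1)) os1]
    rcases rest with _ | ⟨i2, rest2⟩
    · simp
    · simp

-- one A-outer step in terms of the row-wise outer step
theorem pv_outer_step (g p q o : List (Option String)) (infos : List String) :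
    pvAOuter (PySem.Dict.mk [("GeneID", g), ("protein", p), ("ProteinID", q),
        ("others_info", o)]) infos
    = (let c := pvRowOuter (g, p, q, o) infos
       PySem.Dict.mk [("GeneID", c.1), ("protein", c.2.1), ("ProteinID", c.2.2.1),
          ("others_info", c.2.2.2)]) := by
  have happend : (["GeneID", "protein", "ProteinID", "others_info"].foldl
      (fun (d : PySem.Dict String (List (Option String))) k =>
        d.modify k [] (fun l => l ++ [(none : Option String)]))
      (PySem.Dict.mk [("GeneID", g), ("protein", p), ("ProteinID", q), ("others_info", o)]))
      = PySem.Dict.mk [("GeneID", g ++ [none]), ("protein", p ++ [none]),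
          ("ProteinID", q ++ [none]), ("others_info", o ++ [none])] := by
    simp [PySem.Dict.modify, PySem.Dict.insert, PySem.Dict.contains, PySem.Dict.getD,
      PySem.Dict.get?]
  have hkeys : (PySem.Dict.mk [("GeneID", g), ("protein", p), ("ProteinID", q),
      ("others_info", o)] : PySem.Dict String (List (Option String))).keys
      = ["GeneID", "protein", "ProteinID", "others_info"] := by
    simp [PySem.Dict.keys]
  unfold pvAOuter
  rw [hkeys, happend]
  simp only [pv_inner_eq, pvRowOuter]

-- the A fold and the row-wise fold stay in lockstep
theorem pv_fold_eq (cds_infos : List (List String)) :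
    ∀ (g p q o : List (Option String)),
    cds_infos.foldl pvAOuter (PySem.Dict.mk [("GeneID", g), ("protein", p),
        ("ProteinID", q), ("others_info", o)])
    = (let c := cds_infos.foldl pvRowOuter (g, p, q, o)
       PySem.Dict.mk [("GeneID", c.1), ("protein", c.2.1), ("ProteinID", c.2.2.1),
          ("others_info", c.2.2.2)]) := by
  induction cds_infos with
  | nil => intro g p q o; simp
  | cons infos rest ih =>
    intro g p q o
    simp only [List.foldl_cons, pv_outer_step]
    obtain ⟨g1, p1, q1, o1⟩ : List (Option String) × List (Option String) ×
        List (Option String) × List (Option String) := pvRowOuter (g, p, q, o) infos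
    exact ih g1 p1 q1 o1

-- B's reversed early-exit scan over l ++ [x]: the appended x only matters if l has no match
theorem pv_go_append (marker sep x : String) (l : List String) :
    pvLastFieldGo marker sep (l ++ [x])
    = pvOr (pvLastFieldGo marker sep l)
        (if PySem.Str.isIn marker x then some (pvLastSplit x sep) else none) := by
  induction l with
  | nil => cases h : PySem.Str.isIn marker x <;> simp [pvLastFieldGo, pvOr, ← PySem.Str.isIn_eq, h]
  | cons y l ih =>
    simp only [List.cons_append, pvLastFieldGo, ih]
    split_ifs <;> simp [pvOr]

-- the row fold, characterised field by field
theorem pv_row_char (r : List String) :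
    ∀ (g p q : Option String) (os : List String),
    r.foldl pvRow (g, p, q, os)
    = (pvOr (pvLastFieldGo "GeneID" "GeneID:" r.reverse) g,
       pvOr (pvLastFieldGo "protein=" "protein=" r.reverse) p,
       pvOr (pvLastFieldGo "protein_id" "protein_id=" r.reverse) q,
       os ++ r.filter pvOthersPred) := by
  induction r with
  | nil => intro g p q os; simp [pvLastFieldGo, pvOr]
  | cons x rest ih =>
    intro g p q os
    simp only [List.foldl_cons, List.reverse_cons, pvRow, pv_go_append, List.filter_cons]
    rw [ih]
    simp only [Prod.mk.injEq]
    refine ⟨pvOr_if _ _ _ _, pvOr_if _ _ _ _, pvOr_if _ _ _ _, ?_⟩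
    split_ifs <;> simp

-- the row-wise outer fold produces exactly B's four column maps
theorem pv_rowouter_maps (cds_infos : List (List String)) :
    ∀ (gs ps qs os : List (Option String)),
    cds_infos.foldl pvRowOuter (gs, ps, qs, os)
    = (gs ++ cds_infos.map (fun r => pvLastField r "GeneID" "GeneID:"),
       ps ++ cds_infos.map (fun r => pvLastField r "protein=" "protein="),
       qs ++ cds_infos.map (fun r => pvLastField r "protein_id" "protein_id="),
       os ++ cds_infos.map (fun r => if r.isEmpty then none
          else some (PySem.Str.join " / " (r.filter pvOthersPred)))) := by
  induction cds_infos with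
  | nil => intro gs ps qs os; simp
  | cons r rest ih =>
    intro gs ps qs os
    simp only [List.foldl_cons, List.map_cons, pvRowOuter, pv_row_char, pvOr_none]
    rw [ih]
    simp [pvLastField]

-- ===== VERDICT (by name: the statement is the Claim_ definition above) =====
theorem parsing_info_spec : Claim_equal_parsing_info := by
  intro cds_infos _
  unfold Spec_parsing_info
  simp only [parsing_info, parsing_info_alt, pv_fold_eq, pv_rowouter_maps]
  simp
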